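-- pv_equiv track=rewrite | github.com/noltron000/practice-problems | rotate.py | rotate_image
-- ===== SOURCE A (Python) =====
-- def rotate_image(original):
-- 	# BUG height will break if length is zero.
-- 	length = len(original)
-- 	height = len(original[0])
--
-- 	# the length of the rotated list is the original's height.
-- 	rotated = [None] * height
--
-- 	# the height of the rotated list is the original's length.
-- 	for row_id, row in enumerate(rotated):
-- 		rotated[row_id] = [None] * length
--
-- 	for row_id, row in enumerate(original):
-- 		for col_id, val in enumerate(row):
-- 			# the new row id is equal to the og's col id.
-- 			# the new col id is the og's inversed row id.
-- 			rotated[col_id][length - 1 - row_id] = val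
--
-- 	return rotated
-- ===== SOURCE B (Python) =====
-- def rotate_image(original):
-- 	# IndexError on the empty matrix, exactly like the original
-- 	height = len(original[0])
--
-- 	def peel(rows):
-- 		# recursively peel the leading column off every row;
-- 		# each peeled column (read bottom-up via the reversal below) is one output row
-- 		if not rows[0]:
-- 			return []
-- 		return [[r[0] for r in rows]] + peel([r[1:] for r in rows])
--
-- 	return peel(original[::-1])
-- ===== Notes on version B (the rewrite author's own statement) =====
-- stated objective: alternative
-- what changed: B rotates by recursively peeling the leading column off the (reversed) rows, each peeled column becoming one output row, instead of A's pre-allocated None grid filled by scatter-writing every element to its computed rotated index.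
-- outside the precondition, e.g. on rotate_image([[1, 2], [3]]): A returns [[3, 1], [None, 2]], B returns [[3, 1]]; on rotate_image([[1], [2, 3]]): A raises IndexError, B raises IndexError; on rotate_image([]): A raises IndexError, B raises IndexError
import Mathlib
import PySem

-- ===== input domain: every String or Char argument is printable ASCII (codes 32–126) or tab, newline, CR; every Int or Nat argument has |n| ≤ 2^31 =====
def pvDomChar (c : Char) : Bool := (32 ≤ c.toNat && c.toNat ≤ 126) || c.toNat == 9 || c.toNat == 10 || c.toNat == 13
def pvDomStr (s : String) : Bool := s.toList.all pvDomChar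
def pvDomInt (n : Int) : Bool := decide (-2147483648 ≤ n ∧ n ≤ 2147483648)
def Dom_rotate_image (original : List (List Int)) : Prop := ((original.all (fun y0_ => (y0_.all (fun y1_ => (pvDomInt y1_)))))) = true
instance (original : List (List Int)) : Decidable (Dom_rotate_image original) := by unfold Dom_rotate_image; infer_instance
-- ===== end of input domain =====

-- B rotates by recursively peeling the leading column off the reversed rows (each peeled
-- column is one output row) instead of A's scatter-writes into a pre-allocated grid;
-- equal on non-empty rectangular inputs (Pre_).

-- ===== PORT A =====
def rotate_image (original : List (List Int)) : List (List Int) :=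
  let length : Int := PySem.List.len original
  -- original[0]: IndexError on the empty list, excluded by Pre_
  let height : Int := PySem.List.len ((PySem.List.pyGet? original 0).getD [])
  -- rotated = [None] * height  (a None row is modelled as [])
  let rotated : List (List Int) := List.replicate height.toNat []
  -- for row_id, row in enumerate(rotated): rotated[row_id] = [None] * length
  -- (the None cell is modelled as 0; under Pre_ every cell is overwritten before being read)
  let rotated := (PySem.List.enumerate rotated 0).foldl
    (fun st p => PySem.List.pySetD st p.1 (List.replicate length.toNat (0 : Int))) rotated
  -- for row_id, row in enumerate(original): for col_id, val in enumerate(row):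
  --   rotated[col_id][length - 1 - row_id] = val
  -- (pySetD/pyGetD are total; under Pre_ every index is in range, exactly as in the Python)
  (PySem.List.enumerate original 0).foldl
    (fun st p =>
      (PySem.List.enumerate p.2 0).foldl
        (fun st2 q =>
          PySem.List.pySetD st2 q.1
            (PySem.List.pySetD (PySem.List.pyGetD st2 q.1 []) (length - 1 - p.1) q.2)) st)
    rotated

-- ===== PORT B =====
-- peel(rows): 'if not rows[0]: return []' then '[ [r[0] for r in rows] ] + peel([r[1:] for r in rows])'.
-- rows[0] is modelled by headD [] (peel is only reached with rows ≠ [] under Pre_), and r[0] by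
-- headD 0 (under Pre_ the branch guarantees every row is non-empty there, as in the Python).
def peelRot (rows : List (List Int)) : List (List Int) :=
  if h : rows.headD [] = [] then []
  else
    (rows.map (fun r => r.headD 0)) :: peelRot (rows.map (fun r => r.drop 1))
termination_by (rows.headD []).length
decreasing_by
  cases rows with
  | nil => simp at h
  | cons r rs => cases r with
    | nil => simp at h
    | cons a t => simp

def rotate_image_alt (original : List (List Int)) : List (List Int) :=
  -- height = len(original[0]): IndexError on the empty list, excluded by Pre_; value unused
  let _height : Int := PySem.List.len ((PySem.List.pyGet? original 0).getD [])
  -- return peel(original[::-1])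
  peelRot original.reverse

-- ===== PRECONDITION & SPEC =====
-- Pre_ excludes the empty matrix (A raises IndexError on original[0]) and ragged matrices:
-- on a row longer than the first A raises IndexError, and on a row shorter than the first A
-- returns a grid with leftover None holes, which is not a list[list[int]] value.
def Pre_rotate_image (original : List (List Int)) : Prop :=
  original ≠ [] ∧ ∀ row ∈ original, row.length = (original.headD []).length
instance (original : List (List Int)) : Decidable (Pre_rotate_image original) := by
  unfold Pre_rotate_image; infer_instance
def pvWitness_rotate_image : List (List Int) := [[1, 2], [3, 4]]

def Spec_rotate_image (original : List (List Int)) (out : List (List Int)) : Prop := out = rotate_image_alt original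
instance (original : List (List Int)) (out : List (List Int)) : Decidable (Spec_rotate_image original out) := by unfold Spec_rotate_image; infer_instance

-- ===== CLAIM (what is proved, stated in full; the proofs are below) =====
def Claim_equal_rotate_image : Prop := ∀ (original : List (List Int)), Dom_rotate_image original → Pre_rotate_image original → Spec_rotate_image original (rotate_image original)

-- ===== LEMMAS AND PROOFS =====

-- The first loop of A: writing R at every index of a same-length state yields replicate R.
theorem rot_init_fold (ys : List (List Int)) (R : List Int) :
    ∀ (pre post : List (List Int)), ys.length = post.length →
    (PySem.List.enumerate ys (pre.length : Int)).foldl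
        (fun st p => PySem.List.pySetD st p.1 R) (pre ++ post)
      = pre ++ List.replicate ys.length R := by
  induction ys with
  | nil => intro pre post h; simp [PySem.List.enumerate_nil, (List.length_eq_zero_iff).1 h.symm]
  | cons y ys ih =>
    intro pre post h
    cases post with
    | nil => simp at h
    | cons r post' =>
      rw [PySem.List.enumerate_cons]
      simp only [List.foldl_cons]
      have hset : PySem.List.pySetD (pre ++ r :: post') (pre.length : Int) R
          = pre ++ R :: post' := by
        rw [PySem.List.pySetD_natCast,
          List.set_append_right pre.length R (le_refl _)]
        simp
      rw [hset]
      have : ((pre.length : Int) + 1) = (((pre ++ [R]).length : Nat) : Int) := by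
        simp
      rw [this]
      have := ih (pre ++ [R]) post' (by simpa using h)
      simpa [List.append_assoc, List.replicate_succ] using this


-- The inner loop of A is a no-op once the running column index is past the end of the state.
theorem rot_inner_noop (pos : Int) (row : List Int) :
    ∀ (s : Nat) (st : List (List Int)), st.length ≤ s →
    (PySem.List.enumerate row (s : Int)).foldl
        (fun st2 q => PySem.List.pySetD st2 q.1
          (PySem.List.pySetD (PySem.List.pyGetD st2 q.1 []) pos q.2)) st = st := by
  induction row with
  | nil => intro s st _; simp [PySem.List.enumerate_nil]
  | cons v row ih =>
    intro s st hs
    rw [PySem.List.enumerate_cons]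
    simp only [List.foldl_cons]
    rw [PySem.List.pySetD_natCast, List.set_eq_of_length_le hs]
    have hc : ((s : Int) + 1) = (((s + 1 : Nat) : Nat) : Int) := by push_cast; ring
    rw [hc]
    exact ih (s + 1) st (by omega)

-- The inner loop of A writes position pos of each state row, paired with the row's entries.
theorem rot_inner_fold (pos : Int) : ∀ (row : List Int) (pre post : List (List Int)),
    (PySem.List.enumerate row (pre.length : Int)).foldl
        (fun st2 q => PySem.List.pySetD st2 q.1
          (PySem.List.pySetD (PySem.List.pyGetD st2 q.1 []) pos q.2)) (pre ++ post)
      = pre ++ List.zipWith (fun r v => PySem.List.pySetD r pos v) post row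
          ++ post.drop row.length := by
  intro row
  induction row with
  | nil => intro pre post; simp [PySem.List.enumerate_nil]
  | cons v row ih =>
    intro pre post
    rw [PySem.List.enumerate_cons]
    simp only [List.foldl_cons]
    cases post with
    | nil =>
      rw [PySem.List.pySetD_natCast]
      rw [List.set_eq_of_length_le (by simp)]
      have hc : ((pre.length : Int) + 1) = (((pre.length + 1 : Nat) : Nat) : Int) := by
        push_cast; ring
      rw [hc, rot_inner_noop pos row (pre.length + 1) _ (by simp)]
      simp
    | cons r post' =>
      have hget : PySem.List.pyGetD (pre ++ r :: post') (pre.length : Int) [] = r := by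
        rw [PySem.List.pyGetD_natCast, List.getD_append_right _ _ _ _ (le_refl _)]
        simp
      have hset : PySem.List.pySetD (pre ++ r :: post') (pre.length : Int)
            (PySem.List.pySetD r pos v) = pre ++ PySem.List.pySetD r pos v :: post' := by
        rw [PySem.List.pySetD_natCast, List.set_append_right pre.length _ (le_refl _)]
        simp
      rw [hget, hset]
      have hc : ((pre.length : Int) + 1)
          = (((pre ++ [PySem.List.pySetD r pos v]).length : Nat) : Int) := by simp
      rw [hc]
      have := ih (pre ++ [PySem.List.pySetD r pos v]) post'
      simpa [List.append_assoc] using this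


-- The main double loop of A, as a function of the outer row index k and the running grid.
def rotOuter (n : Nat) (rows : List (List Int)) (k : Int) (st : List (List Int)) : List (List Int) :=
  (PySem.List.enumerate rows k).foldl
    (fun st p => (PySem.List.enumerate p.2 0).foldl
      (fun st2 q => PySem.List.pySetD st2 q.1
        (PySem.List.pySetD (PySem.List.pyGetD st2 q.1 []) ((n : Int) - 1 - p.1) q.2)) st) st

-- Elementwise description of the double loop: cell (c, p) of the result holds entry (row, c) of
-- the row that writes column p, i.e. row n - 1 - p - k, and is untouched if no remaining row writes it.
theorem rot_outer (n : Nat) : ∀ (rows : List (List Int)) (k : Nat) (st : List (List Int)),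
    k + rows.length = n →
    (∀ r ∈ rows, r.length = st.length) →
    (∀ s ∈ st, s.length = n) →
    (rotOuter n rows (k : Int) st).length = st.length ∧
    (∀ s ∈ rotOuter n rows (k : Int) st, s.length = n) ∧
    (∀ c p, c < st.length → p < n →
      ((rotOuter n rows (k : Int) st).getD c []).getD p 0 =
        if p + k < n then ((rows.getD (n - 1 - p - k) []).getD c 0)
        else ((st.getD c []).getD p 0)) := by
  intro rows
  induction rows with
  | nil =>
    intro k st hk _ _
    refine ⟨rfl, fun s hs => ?_, fun c p hc hp => ?_⟩
    · simp only [rotOuter, PySem.List.enumerate_nil, List.foldl_nil] at hs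
      exact ‹∀ s ∈ st, s.length = n› s hs
    · simp only [rotOuter, PySem.List.enumerate_nil, List.foldl_nil]
      rw [if_neg (by simp at hk; omega)]
  | cons row rest ih =>
    intro k st hk hrect hst
    have hrow : row.length = st.length := hrect _ (List.mem_cons_self)
    have hkn : k < n := by simp at hk; omega
    -- one outer step
    have hpos : ((n : Int) - 1 - (k : Int)) = ((n - 1 - k : Nat) : Int) := by omega
    have hinner := rot_inner_fold ((n : Int) - 1 - (k : Int)) row
      ([] : List (List Int)) st
    simp only [List.length_nil, Nat.cast_zero, List.nil_append, hrow, List.drop_length,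
      List.append_nil] at hinner
    have hstep : rotOuter n (row :: rest) (k : Int) st
        = rotOuter n rest ((k : Int) + 1)
            (List.zipWith (fun r v => PySem.List.pySetD r ((n : Int) - 1 - (k : Int)) v) st row) := by
      simp only [rotOuter, PySem.List.enumerate_cons, List.foldl_cons]
      rw [hinner]
    set st' := List.zipWith (fun r v => PySem.List.pySetD r ((n : Int) - 1 - (k : Int)) v) st row
      with hst'
    have hlen' : st'.length = st.length := by simp [hst', hrow]
    have helem' : ∀ c, c < st.length →
        st'.getD c [] = (st.getD c []).set (n - 1 - k) (row.getD c 0) := by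
      intro c hc
      have hc' : c < st'.length := by omega
      rw [List.getD_eq_getElem _ _ hc', List.getD_eq_getElem _ _ hc,
        List.getD_eq_getElem _ _ (by omega : c < row.length)]
      simp only [hst', List.getElem_zipWith]
      simp only [hpos, PySem.List.pySetD_natCast]
    have hmem' : ∀ s ∈ st', s.length = n := by
      intro s hs
      rw [List.mem_iff_getElem] at hs
      obtain ⟨i, hi, rfl⟩ := hs
      have hi2 : i < st.length := by omega
      simp only [hst', List.getElem_zipWith]
      simp only [hpos, PySem.List.pySetD_natCast, List.length_set]
      exact hst _ (List.getElem_mem hi2)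
    have hrect' : ∀ r ∈ rest, r.length = st'.length := by
      intro r hr; rw [hlen']; exact hrect r (List.mem_cons_of_mem _ hr)
    have hcast : ((k : Int) + 1) = ((k + 1 : Nat) : Int) := by push_cast; ring
    obtain ⟨h1, h2, h3⟩ := ih (k + 1) st' (by simp at hk ⊢; omega) hrect' hmem'
    rw [hcast] at hstep
    refine ⟨by rw [hstep, h1, hlen'], by rw [hstep]; exact h2, fun c p hc hp => ?_⟩
    rw [hstep, h3 c p (by omega) hp]
    have hstlen : (st.getD c []).length = n :=
      hst _ (by rw [List.getD_eq_getElem _ _ hc]; exact List.getElem_mem hc)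
    by_cases hcase : p + (k + 1) < n
    · rw [if_pos hcase, if_pos (by omega)]
      have : n - 1 - p - k = (n - 1 - p - (k + 1)) + 1 := by omega
      rw [this, List.getD_cons_succ]
    · rw [if_neg hcase]
      by_cases hp2 : p + k < n
      · -- p is exactly the column written by this row
        have hpk : p = n - 1 - k := by omega
        rw [if_pos hp2, helem' c hc]
        have hplen : p < ((st.getD c []).set (n - 1 - k) (row.getD c 0)).length := by
          rw [List.length_set]; omega
        rw [List.getD_eq_getElem _ _ hplen, List.getElem_set, if_pos hpk.symm]
        have : n - 1 - p - k = 0 := by omega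
        rw [this, List.getD_cons_zero]
      · rw [if_neg hp2, helem' c hc]
        have hplen : p < ((st.getD c []).set (n - 1 - k) (row.getD c 0)).length := by
          rw [List.length_set]; omega
        rw [List.getD_eq_getElem _ _ hplen, List.getElem_set, if_neg (by omega)]
        rw [List.getD_eq_getElem _ _ (by omega : p < (st.getD c []).length)]


-- A's first loop on its actual arguments: the grid of placeholder rows becomes replicate.
theorem rot_init_fold' (m : Nat) (R : List Int) :
    (PySem.List.enumerate (List.replicate m ([] : List Int)) 0).foldl
        (fun st p => PySem.List.pySetD st p.1 R) (List.replicate m []) = List.replicate m R := by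
  have := rot_init_fold (List.replicate m ([] : List Int)) R [] (List.replicate m []) (by simp)
  simpa using this

-- Port A on a non-empty input is the double loop run on the replicate grid.
theorem rotate_image_eq_rotOuter (r0 : List Int) (rest : List (List Int)) :
    rotate_image (r0 :: rest) =
      rotOuter (r0 :: rest).length (r0 :: rest) 0
        (List.replicate r0.length (List.replicate (r0 :: rest).length (0 : Int))) := by
  simp only [rotate_image, rotOuter, PySem.List.len_eq, PySem.List.pyGet?_zero_cons,
    Option.getD_some, Int.toNat_natCast]
  rw [rot_init_fold']

-- B's column peeling on a non-empty rectangular input: column c of the rows, for each c < width.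
theorem peelRot_eq (w : Nat) : ∀ rows : List (List Int), rows ≠ [] →
    (∀ r ∈ rows, r.length = w) →
    peelRot rows = (List.range w).map (fun c => rows.map (fun q => q.getD c 0)) := by
  induction w with
  | zero =>
    intro rows hne hw
    cases rows with
    | nil => exact absurd rfl hne
    | cons r rs =>
      have hr : r = [] := List.length_eq_zero_iff.1 (hw r List.mem_cons_self)
      rw [peelRot, dif_pos (by simpa using hr)]
      simp
  | succ w ih =>
    intro rows hne hw
    have hr0 : rows.headD [] ≠ [] := by
      cases rows with
      | nil => exact absurd rfl hne
      | cons r rs =>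
        have := hw r List.mem_cons_self
        intro h; rw [List.headD_cons] at h; rw [h] at this; simp at this
    rw [peelRot, dif_neg hr0]
    have hw2 : ∀ q ∈ rows.map (fun q => q.drop 1), q.length = w := by
      intro q hq
      rw [List.mem_map] at hq
      obtain ⟨a, ha, rfl⟩ := hq
      have := hw a ha
      simp [this]
    rw [ih _ (by simpa using hne) hw2, List.range_succ_eq_map, List.map_cons]
    congr 1
    · exact List.map_congr_left fun q _ => by cases q <;> rfl
    · rw [List.map_map]
      refine List.map_congr_left fun c _ => ?_
      rw [List.map_map]
      exact List.map_congr_left fun q _ => by cases q <;> simp [Function.comp]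

-- Port B on a non-empty rectangular input.
theorem rotate_image_alt_eq (r0 : List Int) (rest : List (List Int))
    (hrect : ∀ row ∈ r0 :: rest, row.length = r0.length) :
    rotate_image_alt (r0 :: rest) =
      (List.range r0.length).map
        (fun c => (r0 :: rest).reverse.map (fun row => row.getD c 0)) := by
  simp only [rotate_image_alt]
  exact peelRot_eq r0.length (r0 :: rest).reverse (by simp)
    (fun r hr => hrect r (List.mem_reverse.mp hr))


-- ===== VERDICT (by name: the statement is the Claim_ definition above) =====
theorem rotate_image_spec : Claim_equal_rotate_image := by
  intro original _ hpre
  obtain ⟨hne, hrect⟩ := hpre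
  obtain ⟨r0, rest, rfl⟩ := List.exists_cons_of_ne_nil hne
  unfold Spec_rotate_image
  have hrect' : ∀ row ∈ r0 :: rest, row.length = r0.length := by simpa using hrect
  obtain ⟨h1, h2, h3⟩ := rot_outer (r0 :: rest).length (r0 :: rest) 0
    (List.replicate r0.length (List.replicate (r0 :: rest).length (0 : Int)))
    (by simp) (fun r hr => by rw [List.length_replicate]; exact hrect' r hr)
    (fun s hs => by rw [List.eq_of_mem_replicate hs, List.length_replicate])
  rw [Nat.cast_zero] at h1 h2 h3
  rw [rotate_image_eq_rotOuter, rotate_image_alt_eq r0 rest hrect']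
  apply List.ext_getElem
  · rw [h1]; simp
  · intro c hc1 hc2
    have hc : c < r0.length := by rw [h1] at hc1; simpa using hc1
    have hrowlen : (rotOuter (r0 :: rest).length (r0 :: rest) 0
        (List.replicate r0.length (List.replicate (r0 :: rest).length 0)))[c].length
          = (r0 :: rest).length := h2 _ (List.getElem_mem hc1)
    apply List.ext_getElem
    · rw [hrowlen]; simp [List.getElem_map]
    · intro p hp1 hp2
      have hpn : p < (r0 :: rest).length := by rw [hrowlen] at hp1; exact hp1
      have e := h3 c p (by simpa using hc) hpn
      rw [List.getD_eq_getElem _ ([] : List Int) hc1] at e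
      rw [List.getD_eq_getElem _ (0 : Int) hp1] at e
      rw [if_pos (by omega)] at e
      rw [e]
      simp only [List.getElem_map, List.getElem_range, List.getElem_reverse]
      have hb : (r0 :: rest).length - 1 - p < (r0 :: rest).length := by simp
      rw [← List.getD_eq_getElem (r0 :: rest) ([] : List Int) hb, Nat.sub_zero]
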